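-- pv_equiv track=rewrite | github.com/arnaudlequen/hashcode2021practice | collisions.py | collisions_pizza
-- ===== SOURCE A (Python) =====
-- def collisions_pizza(pizza, pizzaList):
--     all_collisions = []
--     ingredients = pizza[1]
--     for other_pizza in pizzaList:
--         new_ingredients = other_pizza[1]
--         collisions = ingredients.intersection(new_ingredients)
--         nb_collisions = len(collisions)
--         all_collisions.append(nb_collisions)
--     return all_collisions
-- ===== SOURCE B (Python) =====
-- def collisions_pizza(pizza, pizzaList):
--     # Inverted index: ingredient -> indices of pizzas in pizzaList containing it.
--     index = {}
--     for i, other in enumerate(pizzaList):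
--         for g in other[1]:
--             index.setdefault(g, []).append(i)
--     result = [0] * len(pizzaList)
--     for g in pizza[1]:
--         for i in index.get(g, []):
--             result[i] += 1
--     return result
-- ===== Notes on version B (the rewrite author's own statement) =====
-- stated objective: alternative
-- what changed: Replaces the per-pizza set intersection with an inverted index (ingredient -> pizza indices) built in one pass, then scatters +1 contributions into a zero-initialized result list per shared ingredient.
import Mathlib
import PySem

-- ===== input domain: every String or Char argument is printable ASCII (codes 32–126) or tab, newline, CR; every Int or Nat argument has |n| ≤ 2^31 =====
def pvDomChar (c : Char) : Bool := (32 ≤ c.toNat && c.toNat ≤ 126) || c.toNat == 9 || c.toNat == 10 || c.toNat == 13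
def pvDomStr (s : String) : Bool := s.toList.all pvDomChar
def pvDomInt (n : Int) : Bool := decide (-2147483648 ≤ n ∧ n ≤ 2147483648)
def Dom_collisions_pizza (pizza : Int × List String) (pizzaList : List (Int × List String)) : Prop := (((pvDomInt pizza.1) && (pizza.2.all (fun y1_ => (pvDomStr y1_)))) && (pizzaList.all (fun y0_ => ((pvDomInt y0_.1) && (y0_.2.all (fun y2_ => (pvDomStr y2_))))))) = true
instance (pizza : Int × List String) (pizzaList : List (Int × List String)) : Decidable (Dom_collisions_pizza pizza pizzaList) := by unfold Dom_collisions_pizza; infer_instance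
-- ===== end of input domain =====

-- B replaces the per-pizza set intersection with an inverted index (ingredient -> pizza indices)
-- and a scatter of +1 contributions into a zero-initialized result list (objective: alternative).

-- ===== PORT A =====
def collisions_pizza (pizza : Int × List String) (pizzaList : List (Int × List String)) : List Int :=
  let ingredients := pizza.2
  pizzaList.foldl (fun all_collisions other_pizza =>
    let new_ingredients := other_pizza.2
    let collisions := PySem.Set.inter ingredients new_ingredients
    let nb_collisions := PySem.Set.len collisions
    all_collisions ++ [nb_collisions]) []

-- ===== PORT B =====
-- index.setdefault(g, []).append(i)  ==  index[g] = index.get(g, []) + [i]  ==  Dict.modify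
def pvBuildIndex (pizzaList : List (Int × List String)) : PySem.Dict String (List Int) :=
  (PySem.List.enumerate pizzaList).foldl
    (fun idx ip => ip.2.2.foldl (fun idx2 g => idx2.modify g [] (fun l => l ++ [ip.1])) idx)
    PySem.Dict.empty

-- for i in L: result[i] += 1
def pvScatter (res : List Int) (L : List Int) : List Int :=
  L.foldl (fun r i => PySem.List.pySetD r i (PySem.List.pyGetD r i 0 + 1)) res

def collisions_pizza_alt (pizza : Int × List String) (pizzaList : List (Int × List String)) : List Int :=
  let index := pvBuildIndex pizzaList
  let result := List.replicate pizzaList.length (0 : Int)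
  pizza.2.foldl (fun res g => pvScatter res (index.getD g [])) result

-- ===== PRECONDITION & SPEC =====
-- The ingredient collections are Python sets; a list with duplicate ingredients represents no
-- Python input (sets hold distinct elements), so Pre_ requires the ingredient lists to be duplicate-free.
def Pre_collisions_pizza (pizza : Int × List String) (pizzaList : List (Int × List String)) : Prop :=
  pizza.2.Nodup ∧ ∀ p ∈ pizzaList, p.2.Nodup
instance (pizza : Int × List String) (pizzaList : List (Int × List String)) : Decidable (Pre_collisions_pizza pizza pizzaList) := by unfold Pre_collisions_pizza; infer_instance

def pvWitness_collisions_pizza : (Int × List String) × (List (Int × List String)) :=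
  ((0, ["a", "b"]), [(1, ["a", "c"]), (2, ["d"]), (3, ["b", "a"])])

def Spec_collisions_pizza (pizza : Int × List String) (pizzaList : List (Int × List String)) (out : List Int) : Prop := out = collisions_pizza_alt pizza pizzaList
instance (pizza : Int × List String) (pizzaList : List (Int × List String)) (out : List Int) : Decidable (Spec_collisions_pizza pizza pizzaList out) := by unfold Spec_collisions_pizza; infer_instance

-- ===== CLAIM (what is proved, stated in full; the proofs are below) =====
def Claim_equal_collisions_pizza : Prop := ∀ (pizza : Int × List String) (pizzaList : List (Int × List String)), Dom_collisions_pizza pizza pizzaList → Pre_collisions_pizza pizza pizzaList → Spec_collisions_pizza pizza pizzaList (collisions_pizza pizza pizzaList)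

-- ===== LEMMAS AND PROOFS =====

-- A, written as a map.
theorem pvA_eq_map (pizza : Int × List String) (pizzaList : List (Int × List String)) :
    collisions_pizza pizza pizzaList
      = pizzaList.map (fun p => ((pizza.2.filter (fun x => p.2.contains x)).length : Int)) := by
  show pizzaList.foldl (fun acc p => acc ++ [PySem.Set.len (PySem.Set.inter pizza.2 p.2)]) [] = _
  rw [PySem.List.foldl_append_singleton_eq_map]
  simp [PySem.Set.len, PySem.Set.inter]

-- the (ingredient, index) pairs the nested index-building loop processes, flattened
def pvPairs (pizzaList : List (Int × List String)) : List (String × Int) :=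
  (PySem.List.enumerate pizzaList).flatMap (fun ip => ip.2.2.map (fun g => (g, ip.1)))

theorem pvBuild_general (es : List (Int × (Int × List String))) (d : PySem.Dict String (List Int)) :
    es.foldl (fun idx ip => ip.2.2.foldl (fun idx2 g => idx2.modify g [] (fun l => l ++ [ip.1])) idx) d
      = (es.flatMap (fun ip => ip.2.2.map (fun g => (g, ip.1)))).foldl
          (fun d p => d.modify p.1 [] (fun l => l ++ [p.2])) d := by
  induction es generalizing d with
  | nil => rfl
  | cons ip es ih => simp [List.foldl_append, List.foldl_map, ih]

theorem pvGetD_build (pizzaList : List (Int × List String)) (g : String) :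
    (pvBuildIndex pizzaList).getD g []
      = ((pvPairs pizzaList).filter (fun p => p.1 == g)).map (·.2) := by
  rw [pvBuildIndex, pvBuild_general]
  simpa [pvPairs] using PySem.Dict.getD_foldl_modify_append (pvPairs pizzaList) PySem.Dict.empty g

theorem pvChunk (l : List String) (i : Int) (g : String) :
    ((l.map (fun g' => (g', i))).filter (fun p => p.1 == g)).map (·.2)
      = List.replicate (l.count g) i := by
  induction l with
  | nil => rfl
  | cons x l ih =>
      by_cases h : x = g
      · subst h
        simp [ih, List.replicate_succ]
      · simp [h, ih]

theorem pvIdxList (pizzaList : List (Int × List String)) (g : String) :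
    (pvBuildIndex pizzaList).getD g []
      = (PySem.List.enumerate pizzaList).flatMap
          (fun ip => List.replicate (ip.2.2.count g) ip.1) := by
  rw [pvGetD_build, pvPairs]
  induction PySem.List.enumerate pizzaList with
  | nil => rfl
  | cons ip es ih => simp [List.filter_append, List.map_append, ih, pvChunk]

theorem pvMem_idx (pizzaList : List (Int × List String)) (g : String) (v : Int)
    (hv : v ∈ (pvBuildIndex pizzaList).getD g []) :
    ∃ k : Nat, v = (k : Int) ∧ k < pizzaList.length := by
  rw [pvIdxList] at hv
  rcases List.mem_flatMap.1 hv with ⟨ip, hip, hvin⟩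
  rcases (PySem.List.mem_enumerate_iff _ _ _).1 hip with ⟨k, hk, rfl⟩
  have := List.eq_of_mem_replicate hvin
  exact ⟨k, by simpa using this, hk⟩

theorem pvCount_lt (pizzaList : List (Int × List String)) (g : String) (s v : Int) (hv : v < s) :
    ((PySem.List.enumerate pizzaList s).flatMap
        (fun ip => List.replicate (ip.2.2.count g) ip.1)).count v = 0 := by
  induction pizzaList generalizing s with
  | nil => rfl
  | cons p pl ih =>
      rw [PySem.List.enumerate_cons]
      simp only [List.flatMap_cons, List.count_append]
      rw [ih (s + 1) (by omega), List.count_replicate]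
      simp only [beq_iff_eq]
      rw [if_neg (by omega)]

theorem pvCount_idx (pizzaList : List (Int × List String)) (g : String) (s : Int) (k : Nat)
    (hk : k < pizzaList.length) :
    ((PySem.List.enumerate pizzaList s).flatMap
        (fun ip => List.replicate (ip.2.2.count g) ip.1)).count (s + k)
      = pizzaList[k].2.count g := by
  induction pizzaList generalizing s k with
  | nil => simp at hk
  | cons p pl ih =>
      rw [PySem.List.enumerate_cons]
      simp only [List.flatMap_cons, List.count_append]
      cases k with
      | zero =>
          simp only [Nat.cast_zero, add_zero]
          rw [pvCount_lt pl g (s + 1) s (by omega), List.count_replicate]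
          simp
      | succ k =>
          have hk' : k < pl.length := by simpa using hk
          have hrw : s + ((k + 1 : Nat) : Int) = (s + 1) + (k : Nat) := by push_cast; ring
          rw [hrw, ih (s + 1) k hk', List.count_replicate]
          simp only [beq_iff_eq]
          rw [if_neg (by omega)]
          simp

theorem pvScatter_length (L res : List Int) : (pvScatter res L).length = res.length := by
  induction L generalizing res with
  | nil => rfl
  | cons v L ih =>
      have hstep : pvScatter res (v :: L)
          = pvScatter (PySem.List.pySetD res v (PySem.List.pyGetD res v 0 + 1)) L := rfl
      rw [hstep, ih, PySem.List.length_pySetD]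

theorem pvScatter_getD (L res : List Int)
    (hL : ∀ v ∈ L, ∃ k : Nat, v = (k : Int) ∧ k < res.length)
    (j : Nat) (hj : j < res.length) :
    PySem.List.pyGetD (pvScatter res L) (j : Int) 0
      = PySem.List.pyGetD res (j : Int) 0 + (L.count (j : Int) : Int) := by
  induction L generalizing res with
  | nil => simp [pvScatter]
  | cons v L ih =>
      rcases hL v (by simp) with ⟨k, rfl, hk⟩
      have hstep : pvScatter res ((k : Int) :: L)
          = pvScatter (PySem.List.pySetD res (k : Int) (PySem.List.pyGetD res (k : Int) 0 + 1)) L := rfl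
      rw [hstep]
      have hlen : (PySem.List.pySetD res (k : Int) (PySem.List.pyGetD res (k : Int) 0 + 1)).length = res.length :=
        PySem.List.length_pySetD _ _ _
      rw [ih _ (fun v hv => by rw [hlen]; exact hL v (by simp [hv])) (by omega)]
      rw [PySem.List.pyGetD_pySetD_natCast res k j _ 0 hk, List.count_cons]
      by_cases h : j = k
      · subst h
        simp
        omega
      · have hne : (((k : Nat) : Int) == ((j : Nat) : Int)) = false := by simp; omega
        simp [h, hne]

theorem pvOuter_length (gs : List String) (idx : String → List Int) (res : List Int) :
    (gs.foldl (fun r g => pvScatter r (idx g)) res).length = res.length := by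
  induction gs generalizing res with
  | nil => rfl
  | cons g gs ih => simp [List.foldl_cons, ih, pvScatter_length]

theorem pvOuter_getD (gs : List String) (idx : String → List Int) (res : List Int)
    (hidx : ∀ g, ∀ v ∈ idx g, ∃ k : Nat, v = (k : Int) ∧ k < res.length)
    (j : Nat) (hj : j < res.length) :
    PySem.List.pyGetD (gs.foldl (fun r g => pvScatter r (idx g)) res) (j : Int) 0
      = PySem.List.pyGetD res (j : Int) 0
        + (gs.map (fun g => (((idx g).count (j : Int) : Nat) : Int))).sum := by
  induction gs generalizing res with
  | nil => simp
  | cons g gs ih =>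
      rw [List.foldl_cons]
      have hlen : (pvScatter res (idx g)).length = res.length := pvScatter_length _ _
      rw [ih (pvScatter res (idx g)) (fun g' v hv => by rw [hlen]; exact hidx g' v hv) (by omega)]
      rw [pvScatter_getD (idx g) res (hidx g) j hj]
      simp; ring

theorem pvSum_indicator (gs t : List String) (ht : t.Nodup) :
    (gs.map (fun g => ((t.count g : Nat) : Int))).sum
      = ((gs.filter (fun g => t.contains g)).length : Int) := by
  induction gs with
  | nil => rfl
  | cons g gs ih =>
      simp only [List.map_cons, List.sum_cons, List.filter_cons]
      by_cases h : g ∈ t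
      · rw [List.count_eq_one_of_mem ht h]
        simp [h, ih]
        ring
      · rw [List.count_eq_zero_of_not_mem h]
        simp [h, ih]

-- ===== VERDICT (by name: the statement is the Claim_ definition above) =====
theorem collisions_pizza_spec : Claim_equal_collisions_pizza := by
  intro pizza pizzaList _ hpre
  unfold Spec_collisions_pizza
  rcases hpre with ⟨_, hnd⟩
  rw [pvA_eq_map]
  unfold collisions_pizza_alt
  apply List.ext_getElem
  · simp [pvOuter_length]
  intro j hj hj'
  have hn : j < pizzaList.length := by simpa [pvOuter_length] using hj'
  have hidx : ∀ g, ∀ v ∈ (pvBuildIndex pizzaList).getD g [],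
      ∃ k : Nat, v = (k : Int) ∧ k < (List.replicate pizzaList.length (0 : Int)).length := by
    intro g v hv
    simpa using pvMem_idx pizzaList g v hv
  have hB := pvOuter_getD pizza.2 (fun g => (pvBuildIndex pizzaList).getD g [])
      (List.replicate pizzaList.length (0 : Int)) hidx j (by simpa using hn)
  have hcount : ∀ g, ((pvBuildIndex pizzaList).getD g []).count (j : Int)
      = pizzaList[j].2.count g := by
    intro g
    rw [pvIdxList]
    have := pvCount_idx pizzaList g 0 j hn
    simpa using this
  simp only [hcount] at hB
  have hzero : PySem.List.pyGetD (List.replicate pizzaList.length (0 : Int)) (j : Int) 0 = 0 := by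
    simp [PySem.List.pyGetD_natCast, List.getD_eq_getElem?_getD]
  rw [hzero] at hB
  have hsum := pvSum_indicator pizza.2 pizzaList[j].2 (hnd _ (List.getElem_mem hn))
  have hgetB : (pizza.2.foldl (fun res g => pvScatter res ((pvBuildIndex pizzaList).getD g []))
      (List.replicate pizzaList.length (0 : Int)))[j] =
      PySem.List.pyGetD (pizza.2.foldl (fun res g => pvScatter res ((pvBuildIndex pizzaList).getD g []))
      (List.replicate pizzaList.length (0 : Int))) (j : Int) 0 := by
    rw [PySem.List.pyGetD_natCast]
    exact (List.getD_eq_getElem _ _ hj').symm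
  rw [List.getElem_map, hgetB, hB, hsum]
  simp
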